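-- pv_equiv track=rewrite | github.com/Sanchit112/MiniGoBot | my_player3.py | find_dead_stones
-- ===== SOURCE A (Python) =====
-- def all_connected_friendly_neighbors(x, y, piece_type, board):
--     not_visited = [(x, y)]
--     connected_neighbors = []
--     while not_visited:
--         x, y = not_visited.pop()
--         connected_neighbors.append((x, y))
--         neighbors_friendly = friendly_neighbors(board, x, y, piece_type)
--         for friend in neighbors_friendly:
--             if friend not in not_visited and friend not in connected_neighbors:
--                 not_visited.append(friend)
--     return connected_neighbors
--
-- def liberty(board, x, y, piece_type):
--     connected_neighbors = all_connected_friendly_neighbors(x, y, piece_type, board)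
--     liberties = []
--     for x, y in connected_neighbors:
--         neighbors = all_neighbors(x, y)
--         for x, y in neighbors:
--             if board[x][y] == 0 and (x, y) not in liberties:
--                 liberties.append((x, y))
--     return liberties
--
-- def all_neighbors(x, y):
--     neighbors = []
--     if x > 0:
--         neighbors.append((x - 1, y))
--     if x < 4:
--         neighbors.append((x + 1, y))
--     if y > 0:
--         neighbors.append((x, y - 1))
--     if y < 4:
--         neighbors.append((x, y + 1))
--     return neighbors
--
-- def friendly_neighbors(board, x, y, piece_type):
--     current_friendly_neighbors = []
--     neighbors = all_neighbors(x, y)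
--     for x, y in neighbors:
--         if board[x][y] == piece_type and (x, y) not in current_friendly_neighbors:
--             current_friendly_neighbors.append((x, y))
--     return current_friendly_neighbors
--
-- def find_dead_stones(piece_type, board):
--     dead_stones = []
--     for x in range(5):
--         for y in range(5):
--             if board[x][y] == piece_type:
--                 liberties = liberty(board, x, y, piece_type)
--                 if not liberties and (x, y) not in dead_stones:
--                     dead_stones.append((x, y))
--     return dead_stones
-- ===== SOURCE B (Python) =====
-- def find_dead_stones(piece_type, board):
--     # Liberty propagation: mark stones alive from liberties inward via a bounded
--     # fixed-point sweep, instead of a flood fill per stone.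
--     stones = [(x, y) for x in range(5) for y in range(5) if board[x][y] == piece_type]
--     alive = []
--     for _ in range(26):  # 26 sweeps always reach the fixed point (at most 25 stones)
--         for (x, y) in stones:
--             if (x, y) not in alive and any(
--                 0 <= nx <= 4 and 0 <= ny <= 4
--                 and (board[nx][ny] == 0 or (nx, ny) in alive)
--                 for nx, ny in ((x - 1, y), (x + 1, y), (x, y - 1), (x, y + 1))
--             ):
--                 alive.append((x, y))
--     return [p for p in stones if p not in alive]
-- ===== Notes on version B (the rewrite author's own statement) =====
-- stated objective: alternative
-- what changed: Replaces the per-stone DFS flood fill (recomputing each group and its full liberty list for every stone) by one global bounded fixed-point sweep that propagates 'alive' from empty neighbours inward through friendly stones, then filters the stone list once.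
import Mathlib
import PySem

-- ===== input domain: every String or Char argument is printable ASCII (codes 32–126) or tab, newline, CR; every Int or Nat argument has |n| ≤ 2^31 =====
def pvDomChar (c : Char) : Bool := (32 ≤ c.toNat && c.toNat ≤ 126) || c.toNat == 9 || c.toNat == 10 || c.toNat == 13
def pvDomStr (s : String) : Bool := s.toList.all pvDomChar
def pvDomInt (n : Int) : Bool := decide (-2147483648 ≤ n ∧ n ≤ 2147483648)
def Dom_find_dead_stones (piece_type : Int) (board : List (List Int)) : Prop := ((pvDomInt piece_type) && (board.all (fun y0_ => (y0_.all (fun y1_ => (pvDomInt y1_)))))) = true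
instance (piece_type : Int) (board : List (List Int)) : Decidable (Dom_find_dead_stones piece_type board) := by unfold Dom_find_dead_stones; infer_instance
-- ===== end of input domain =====

-- B replaces A's per-stone DFS flood fill by one global bounded fixed-point sweep that
-- propagates 'alive' from empty neighbours inward through friendly stones (alternative
-- algorithm, same return value).

-- ===== PORT A =====

-- board[x][y]; `none` is exactly Python's IndexError, excluded by Pre_ (both ports only read x, y ∈ [0, 4])
def pvCell (board : List (List Int)) (x y : Int) : Option Int :=
  (PySem.List.pyGet? board x).bind (fun row => PySem.List.pyGet? row y)

def all_neighbors (x y : Int) : List (Int × Int) :=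
  (((if x > 0 then [((x - 1 : Int), y)] else []) ++ (if x < 4 then [(x + 1, y)] else [])) ++
    (if y > 0 then [(x, y - 1)] else [])) ++ (if y < 4 then [(x, y + 1)] else [])

def friendly_neighbors (board : List (List Int)) (x y piece_type : Int) : List (Int × Int) :=
  (all_neighbors x y).foldl
    (fun acc p => if pvCell board p.1 p.2 == some piece_type && !(acc.contains p) then acc ++ [p] else acc) []

-- Python's `while not_visited:` loop; the fuel 26 only makes the loop total: every iteration moves
-- one distinct in-grid cell from the stack to `connected_neighbors`, so at most 25 iterations ever
-- run (established inside `pvACFNLoop_spec` below; the fuel is never exhausted on a nonempty stack).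
def pvACFNLoop (piece_type : Int) (board : List (List Int)) :
    Nat → List (Int × Int) → List (Int × Int) → List (Int × Int)
  | 0, _, conn => conn
  | fuel + 1, nv, conn =>
    match nv.getLast? with      -- x, y = not_visited.pop()
    | none => conn
    | some p =>
      let nv' := nv.dropLast
      let conn' := conn ++ [p]
      let nv'' := (friendly_neighbors board p.1 p.2 piece_type).foldl
        (fun s f => if !(s.contains f) && !(conn'.contains f) then s ++ [f] else s) nv'
      pvACFNLoop piece_type board fuel nv'' conn'

def all_connected_friendly_neighbors (x y piece_type : Int) (board : List (List Int)) : List (Int × Int) :=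
  pvACFNLoop piece_type board 26 [(x, y)] []

def liberty (board : List (List Int)) (x y piece_type : Int) : List (Int × Int) :=
  (all_connected_friendly_neighbors x y piece_type board).foldl
    (fun libs p => (all_neighbors p.1 p.2).foldl
      (fun libs q => if pvCell board q.1 q.2 == some 0 && !(libs.contains q) then libs ++ [q] else libs) libs) []

def find_dead_stones (piece_type : Int) (board : List (List Int)) : List (Int × Int) :=
  (PySem.List.pyRange 0 5 1).foldl (fun dead x =>
    (PySem.List.pyRange 0 5 1).foldl (fun dead y =>
      if pvCell board x y == some piece_type then
        let liberties := liberty board x y piece_type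
        if liberties.isEmpty && !(dead.contains (x, y)) then dead ++ [(x, y)] else dead
      else dead) dead) []

-- ===== PORT B =====

def pvNbrs4 (x y : Int) : List (Int × Int) := [(x - 1, y), (x + 1, y), (x, y - 1), (x, y + 1)]

-- the `any(...)` generator test of Source B
def pvTrigger (board : List (List Int)) (alive : List (Int × Int)) (p : Int × Int) : Bool :=
  (pvNbrs4 p.1 p.2).any (fun q =>
    decide (0 ≤ q.1) && decide (q.1 ≤ 4) && decide (0 ≤ q.2) && decide (q.2 ≤ 4) &&
    (pvCell board q.1 q.2 == some 0 || alive.contains q))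

def find_dead_stones_alt (piece_type : Int) (board : List (List Int)) : List (Int × Int) :=
  let stones := (PySem.List.pyRange 0 5 1).foldl (fun acc x =>
    (PySem.List.pyRange 0 5 1).foldl (fun acc y =>
      if pvCell board x y == some piece_type then acc ++ [(x, y)] else acc) acc) []
  let alive := (PySem.List.pyRange 0 26 1).foldl (fun alive _ =>
    stones.foldl (fun alive p =>
      if !(alive.contains p) && pvTrigger board alive p then alive ++ [p] else alive) alive) []
  stones.filter (fun p => !(alive.contains p))

-- ===== PRECONDITION & SPEC =====

-- A reads board[x][y] for every x, y ∈ [0, 4]; Pre_ excludes exactly the boards on which that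
-- raises IndexError (fewer than 5 rows, or one of the first 5 rows shorter than 5 entries).
def Pre_find_dead_stones (piece_type : Int) (board : List (List Int)) : Prop :=
  5 ≤ board.length ∧ ∀ row ∈ board.take 5, 5 ≤ row.length

instance (piece_type : Int) (board : List (List Int)) : Decidable (Pre_find_dead_stones piece_type board) := by
  unfold Pre_find_dead_stones; infer_instance

def pvWitness_find_dead_stones : Int × List (List Int) :=
  (1, [[0, 1, 0, 0, 0], [1, 2, 1, 0, 0], [0, 1, 0, 0, 0], [0, 0, 0, 2, 1], [0, 0, 0, 1, 2]])

def Spec_find_dead_stones (piece_type : Int) (board : List (List Int)) (out : List (Int × Int)) : Prop := out = find_dead_stones_alt piece_type board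
instance (piece_type : Int) (board : List (List Int)) (out : List (Int × Int)) : Decidable (Spec_find_dead_stones piece_type board out) := by unfold Spec_find_dead_stones; infer_instance

-- ===== CLAIM (what is proved, stated in full; the proofs are below) =====
def Claim_equal_find_dead_stones : Prop := ∀ (piece_type : Int) (board : List (List Int)), Dom_find_dead_stones piece_type board → Pre_find_dead_stones piece_type board → Spec_find_dead_stones piece_type board (find_dead_stones piece_type board)

-- ===== LEMMAS AND PROOFS =====

-- ---- the abstract specification both programs compute ----

def InGrid (p : Int × Int) : Prop := 0 ≤ p.1 ∧ p.1 ≤ 4 ∧ 0 ≤ p.2 ∧ p.2 ≤ 4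

def Friendly (piece_type : Int) (board : List (List Int)) (p : Int × Int) : Prop :=
  pvCell board p.1 p.2 = some piece_type

def EmptyAt (board : List (List Int)) (p : Int × Int) : Prop := pvCell board p.1 p.2 = some 0

def GoStep (piece_type : Int) (board : List (List Int)) (p q : Int × Int) : Prop :=
  q ∈ all_neighbors p.1 p.2 ∧ Friendly piece_type board q

def HasLib (board : List (List Int)) (p : Int × Int) : Prop :=
  ∃ q ∈ all_neighbors p.1 p.2, EmptyAt board q

def Alive (piece_type : Int) (board : List (List Int)) (p : Int × Int) : Prop :=
  ∃ c, Relation.ReflTransGen (GoStep piece_type board) p c ∧ HasLib board c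

def rowMajor : List (Int × Int) :=
  ([0, 1, 2, 3, 4] : List Int).flatMap (fun x => ([0, 1, 2, 3, 4] : List Int).map (fun y => (x, y)))

lemma inGrid_mk {x y : Int} : InGrid (x, y) ↔ 0 ≤ x ∧ x ≤ 4 ∧ 0 ≤ y ∧ y ≤ 4 := Iff.rfl

-- ---- neighbourhood lemmas ----

lemma mem_all_neighbors {x y : Int} {q : Int × Int} :
    q ∈ all_neighbors x y ↔
      (0 < x ∧ q = (x - 1, y)) ∨ (x < 4 ∧ q = (x + 1, y)) ∨
      (0 < y ∧ q = (x, y - 1)) ∨ (y < 4 ∧ q = (x, y + 1)) := by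
  by_cases h1 : 0 < x <;> by_cases h2 : x < 4 <;> by_cases h3 : 0 < y <;> by_cases h4 : y < 4 <;>
    simp [all_neighbors, h1, h2, h3, h4]

lemma inGrid_of_mem_all_neighbors {p q : Int × Int} (hp : InGrid p)
    (hq : q ∈ all_neighbors p.1 p.2) : InGrid q := by
  obtain ⟨x, y⟩ := p
  obtain ⟨hx0, hx4, hy0, hy4⟩ := hp
  rcases mem_all_neighbors.1 hq with ⟨h, rfl⟩ | ⟨h, rfl⟩ | ⟨h, rfl⟩ | ⟨h, rfl⟩ <;>
    exact inGrid_mk.2 ⟨by omega, by omega, by omega, by omega⟩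

lemma mem_all_neighbors_iff_nbrs4 {p q : Int × Int} (hp : InGrid p) :
    q ∈ all_neighbors p.1 p.2 ↔ q ∈ pvNbrs4 p.1 p.2 ∧ InGrid q := by
  obtain ⟨x, y⟩ := p
  obtain ⟨hx0, hx4, hy0, hy4⟩ := hp
  constructor
  · intro h
    rcases mem_all_neighbors.1 h with ⟨h1, rfl⟩ | ⟨h1, rfl⟩ | ⟨h1, rfl⟩ | ⟨h1, rfl⟩ <;>
      exact ⟨by simp [pvNbrs4], inGrid_mk.2 ⟨by omega, by omega, by omega, by omega⟩⟩
  · rintro ⟨h4, hg⟩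
    rw [mem_all_neighbors]
    simp only [pvNbrs4, List.mem_cons, List.not_mem_nil, or_false] at h4
    rcases h4 with rfl | rfl | rfl | rfl
    · exact Or.inl ⟨by rw [inGrid_mk] at hg; omega, rfl⟩
    · exact Or.inr (Or.inl ⟨by rw [inGrid_mk] at hg; omega, rfl⟩)
    · exact Or.inr (Or.inr (Or.inl ⟨by rw [inGrid_mk] at hg; omega, rfl⟩))
    · exact Or.inr (Or.inr (Or.inr ⟨by rw [inGrid_mk] at hg; omega, rfl⟩))

lemma mem_rowMajor_iff {p : Int × Int} : p ∈ rowMajor ↔ InGrid p := by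
  obtain ⟨x, y⟩ := p
  simp only [rowMajor, List.mem_flatMap, List.mem_map, inGrid_mk]
  constructor
  · rintro ⟨a, ha, b, hb, heq⟩
    simp only [Prod.mk.injEq] at heq
    obtain ⟨rfl, rfl⟩ := heq
    simp only [List.mem_cons, List.not_mem_nil, or_false] at ha hb
    rcases ha with rfl | rfl | rfl | rfl | rfl <;> rcases hb with rfl | rfl | rfl | rfl | rfl <;>
      norm_num
  · rintro ⟨h1, h2, h3, h4⟩
    refine ⟨x, ?_, y, ?_, rfl⟩ <;> [interval_cases x; interval_cases y] <;> simp

lemma nodup_rowMajor : rowMajor.Nodup := by decide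

lemma length_rowMajor : rowMajor.length = 25 := by decide

-- ---- generic fold shapes used by both ports ----

lemma pvNodupSnoc {α : Type} {l : List α} {a : α} (h : l.Nodup) (ha : a ∉ l) : (l ++ [a]).Nodup := by
  refine (List.nodup_append).2 ⟨h, List.nodup_singleton a, ?_⟩
  intro x hx b hb
  simp only [List.mem_singleton] at hb
  subst hb
  exact fun he => ha (he ▸ hx)

lemma foldl_dedup_mem {α : Type} [BEq α] [LawfulBEq α] (c : α → Bool) :
    ∀ (l s0 : List α) (x : α),
      x ∈ l.foldl (fun s a => if c a && !(s.contains a) then s ++ [a] else s) s0 ↔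
        x ∈ s0 ∨ (x ∈ l ∧ c x = true) := by
  intro l
  induction l with
  | nil => intro s0 x; simp
  | cons a l ih =>
    intro s0 x
    simp only [List.foldl_cons]
    rw [ih]
    have hstep : ∀ y : α, y ∈ (if c a && !(s0.contains a) then s0 ++ [a] else s0) ↔
        y ∈ s0 ∨ (y = a ∧ c a = true) := by
      intro y
      split_ifs with h
      · have hca : c a = true := by rw [Bool.and_eq_true] at h; exact h.1
        simp only [List.mem_append, List.mem_singleton]
        constructor
        · rintro (h1 | rfl)
          · exact Or.inl h1
          · exact Or.inr ⟨rfl, hca⟩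
        · rintro (h1 | ⟨rfl, _⟩)
          · exact Or.inl h1
          · exact Or.inr rfl
      · constructor
        · exact Or.inl
        · rintro (h1 | ⟨rfl, hca⟩)
          · exact h1
          · by_cases hm : y ∈ s0
            · exact hm
            · exact absurd (by simp [hca, hm]) h
    rw [hstep]
    constructor
    · rintro ((hx | ⟨rfl, hca⟩) | ⟨hl, hcx⟩)
      · exact Or.inl hx
      · exact Or.inr ⟨List.mem_cons_self .., hca⟩
      · exact Or.inr ⟨List.mem_cons_of_mem _ hl, hcx⟩
    · rintro (hx | ⟨hmem, hcx⟩)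
      · exact Or.inl (Or.inl hx)
      · rcases List.mem_cons.1 hmem with rfl | hl
        · exact Or.inl (Or.inr ⟨rfl, hcx⟩)
        · exact Or.inr ⟨hl, hcx⟩

lemma foldl_dedup_eq_filter {α : Type} [BEq α] [LawfulBEq α] (c : α → Bool) :
    ∀ (l s0 : List α), (∀ a ∈ l, a ∉ s0) → l.Nodup →
      l.foldl (fun s a => if c a && !(s.contains a) then s ++ [a] else s) s0 = s0 ++ l.filter c := by
  intro l
  induction l with
  | nil => intro s0 _ _; simp
  | cons a l ih =>
    intro s0 hdis hnd
    have hna : a ∉ s0 := hdis a (by simp)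
    simp only [List.foldl_cons]
    by_cases hca : c a = true
    · rw [if_pos (by simp [hca, hna])]
      rw [ih (s0 ++ [a]) ?_ ((List.nodup_cons.1 hnd).2)]
      · simp [hca]
      · intro b hb
        simp only [List.mem_append, List.mem_singleton]
        rintro (h | rfl)
        · exact hdis b (by simp [hb]) h
        · exact (List.nodup_cons.1 hnd).1 hb
    · rw [if_neg (by simp [hca])]
      rw [ih s0 (fun b hb => hdis b (by simp [hb])) ((List.nodup_cons.1 hnd).2)]
      simp [hca]

lemma foldl_dedup_nodup_append {α : Type} [BEq α] [LawfulBEq α] (c : α → Bool) (pre : List α)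
    (hc : ∀ a, c a = true → a ∉ pre) :
    ∀ (l s0 : List α), (pre ++ s0).Nodup →
      (pre ++ l.foldl (fun s a => if c a && !(s.contains a) then s ++ [a] else s) s0).Nodup := by
  intro l
  induction l with
  | nil => intro s0 h; exact h
  | cons a l ih =>
    intro s0 h
    simp only [List.foldl_cons]
    by_cases hg : (c a && !(s0.contains a)) = true
    · rw [if_pos hg]
      apply ih
      rw [Bool.and_eq_true] at hg
      have hca : c a = true := hg.1
      have hna : a ∉ s0 := by
        have := hg.2
        simpa using this
      have h2 : a ∉ pre ++ s0 := by
        rw [List.mem_append]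
        rintro (h' | h')
        · exact hc a hca h'
        · exact hna h'
      rw [← List.append_assoc]
      exact pvNodupSnoc h h2
    · rw [if_neg hg]; exact ih s0 h

lemma foldl_const_iterate {α β : Type} (f : α → α) : ∀ (l : List β) (a : α),
    l.foldl (fun a _ => f a) a = f^[l.length] a := by
  intro l
  induction l with
  | nil => intro a; rfl
  | cons x l ih =>
    intro a
    simp only [List.foldl_cons, List.length_cons, ih, Function.iterate_succ_apply]

-- ---- A-side: flood-fill characterisation ----

lemma mem_friendly_neighbors {board : List (List Int)} {x y piece_type : Int} {q : Int × Int} :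
    q ∈ friendly_neighbors board x y piece_type ↔
      q ∈ all_neighbors x y ∧ pvCell board q.1 q.2 = some piece_type := by
  have h := foldl_dedup_mem (fun p : Int × Int => pvCell board p.1 p.2 == some piece_type)
    (all_neighbors x y) [] q
  unfold friendly_neighbors
  rw [h]
  simp

lemma reach_escape {α : Type} {S : α → α → Prop} {C N : List α}
    (hcl : ∀ a ∈ C, ∀ b, S a b → b ∈ C ∨ b ∈ N) :
    ∀ {m x : α}, Relation.ReflTransGen S m x → m ∈ C →
      x ∈ C ∨ ∃ r ∈ N, Relation.ReflTransGen S r x := by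
  intro m x h
  induction h using Relation.ReflTransGen.head_induction_on with
  | refl => intro hm; exact Or.inl hm
  | head h' htail ih =>
    intro hm
    rcases hcl _ hm _ h' with hC | hN
    · exact ih hC
    · exact Or.inr ⟨_, hN, htail⟩

lemma pvACFNLoop_spec (piece_type : Int) (board : List (List Int)) :
    ∀ (fuel : Nat) (nv conn : List (Int × Int)),
      26 ≤ fuel + conn.length →
      (conn ++ nv).Nodup →
      (∀ p ∈ conn ++ nv, InGrid p) →
      (∀ p ∈ conn, ∀ q, GoStep piece_type board p q → q ∈ conn ∨ q ∈ nv) →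
      ∀ x, x ∈ pvACFNLoop piece_type board fuel nv conn ↔
        x ∈ conn ∨ ∃ r ∈ nv, Relation.ReflTransGen (GoStep piece_type board) r x := by
  intro fuel
  induction fuel with
  | zero =>
    intro nv conn h26 hnd hgrid _ x
    exfalso
    have hcnd : conn.Nodup := ((List.nodup_append).1 hnd).1
    have hsub : conn ⊆ rowMajor := fun p hp => mem_rowMajor_iff.2 (hgrid p (List.mem_append.2 (Or.inl hp)))
    have hle := (List.subperm_of_subset hcnd hsub).length_le
    rw [length_rowMajor] at hle
    omega
  | succ fuel ih =>
    intro nv conn h26 hnd hgrid hcl x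
    rcases hnv : nv.getLast? with _ | p
    · have hnil : nv = [] := List.getLast?_eq_none_iff.1 hnv
      subst hnil
      simp [pvACFNLoop]
    · obtain ⟨nv', rfl⟩ := List.getLast?_eq_some_iff.1 hnv
      simp only [pvACFNLoop, List.getLast?_concat, List.dropLast_concat]
      have hpmem : p ∈ conn ++ (nv' ++ [p]) := by simp
      have hpg : InGrid p := hgrid p hpmem
      set conn' : List (Int × Int) := conn ++ [p] with hconn'
      set FN : List (Int × Int) := friendly_neighbors board p.1 p.2 piece_type with hFNdef
      have hfun : (fun (s : List (Int × Int)) f => if !(s.contains f) && !(conn'.contains f) then s ++ [f] else s)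
          = (fun (s : List (Int × Int)) f => if (!(conn'.contains f)) && !(s.contains f) then s ++ [f] else s) := by
        funext s f; rw [Bool.and_comm]
      rw [hfun]
      set push : List (Int × Int) :=
        FN.foldl (fun s f => if (!(conn'.contains f)) && !(s.contains f) then s ++ [f] else s) nv' with hpushdef
      have hpush : ∀ z, z ∈ push ↔ z ∈ nv' ∨ (z ∈ FN ∧ z ∉ conn') := by
        intro z
        have h := foldl_dedup_mem (fun f : Int × Int => !(conn'.contains f)) FN nv' z
        rw [hpushdef, h]
        simp
      have hperm : (conn ++ (nv' ++ [p])).Perm (conn' ++ nv') := by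
        have h0 : (nv' ++ [p]).Perm ([p] ++ nv') := List.perm_append_comm
        have h1 := h0.append_left conn
        rw [hconn', List.append_assoc]
        exact h1
      have hnd2 : (conn' ++ nv').Nodup := (hperm.nodup_iff).1 hnd
      have hnd' : (conn' ++ push).Nodup := by
        rw [hpushdef]
        exact foldl_dedup_nodup_append (fun f => !(conn'.contains f)) conn'
          (by intro a ha; simpa using ha) FN nv' hnd2
      have hgrid' : ∀ z ∈ conn' ++ push, InGrid z := by
        intro z hz
        rcases List.mem_append.1 hz with hz | hz
        · rcases List.mem_append.1 hz with hz | hz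
          · exact hgrid z (by simp [hz])
          · simp only [List.mem_singleton] at hz; subst hz; exact hpg
        · rcases (hpush z).1 hz with hz | ⟨hz, _⟩
          · exact hgrid z (by simp [hz])
          · exact inGrid_of_mem_all_neighbors hpg (mem_friendly_neighbors.1 hz).1
      have hcl' : ∀ c0 ∈ conn', ∀ q, GoStep piece_type board c0 q → q ∈ conn' ∨ q ∈ push := by
        intro c0 hc0 q hq
        rcases List.mem_append.1 hc0 with hc0 | hc0
        · rcases hcl c0 hc0 q hq with h | h
          · exact Or.inl (by rw [hconn']; simp [h])
          · rcases List.mem_append.1 h with h | h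
            · exact Or.inr ((hpush q).2 (Or.inl h))
            · simp only [List.mem_singleton] at h; subst h; exact Or.inl (by rw [hconn']; simp)
        · simp only [List.mem_singleton] at hc0
          subst hc0
          have hqFN : q ∈ FN := mem_friendly_neighbors.2 ⟨hq.1, hq.2⟩
          by_cases hqc : q ∈ conn'
          · exact Or.inl hqc
          · exact Or.inr ((hpush q).2 (Or.inr ⟨hqFN, hqc⟩))
      have h26' : 26 ≤ fuel + conn'.length := by
        simp only [hconn', List.length_append, List.length_singleton]
        omega
      rw [ih push conn' h26' hnd' hgrid' hcl' x]
      constructor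
      · rintro (hx | ⟨r, hr, hR⟩)
        · rcases List.mem_append.1 hx with h | h
          · exact Or.inl h
          · simp only [List.mem_singleton] at h
            subst h
            exact Or.inr ⟨x, by simp, Relation.ReflTransGen.refl⟩
        · rcases (hpush r).1 hr with h | ⟨hFNr, _⟩
          · exact Or.inr ⟨r, by simp [h], hR⟩
          · have hstep : GoStep piece_type board p r := by
              have hm := mem_friendly_neighbors.1 hFNr
              exact ⟨hm.1, hm.2⟩
            exact Or.inr ⟨p, by simp, Relation.ReflTransGen.head hstep hR⟩
      · rintro (hx | ⟨r, hr, hR⟩)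
        · exact Or.inl (List.mem_append.2 (Or.inl hx))
        · rcases List.mem_append.1 hr with h | h
          · exact Or.inr ⟨r, (hpush r).2 (Or.inl h), hR⟩
          · simp only [List.mem_singleton] at h
            subst h
            exact reach_escape hcl' hR (by rw [hconn']; simp)

lemma mem_ACFN {piece_type : Int} {board : List (List Int)} {p : Int × Int}
    (h : InGrid p) {q : Int × Int} :
    q ∈ all_connected_friendly_neighbors p.1 p.2 piece_type board ↔
      Relation.ReflTransGen (GoStep piece_type board) p q := by
  unfold all_connected_friendly_neighbors
  rw [pvACFNLoop_spec piece_type board 26 [(p.1, p.2)] [] (by simp) (by simp)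
    (by intro z hz; simp only [List.nil_append, List.mem_singleton] at hz; subst hz; exact h)
    (by intro z hz; simp at hz) q]
  simp

lemma mem_liberty_fold (board : List (List Int)) :
    ∀ (conn libs0 : List (Int × Int)) (z : Int × Int),
      z ∈ conn.foldl (fun libs p => (all_neighbors p.1 p.2).foldl
          (fun libs q => if pvCell board q.1 q.2 == some 0 && !(libs.contains q) then libs ++ [q] else libs) libs) libs0 ↔
        z ∈ libs0 ∨ ∃ p ∈ conn, z ∈ all_neighbors p.1 p.2 ∧ pvCell board z.1 z.2 = some 0 := by
  intro conn
  induction conn with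
  | nil => intro libs0 z; simp
  | cons p conn ih =>
    intro libs0 z
    simp only [List.foldl_cons]
    rw [ih]
    have h2 := foldl_dedup_mem (fun q : Int × Int => pvCell board q.1 q.2 == some 0)
      (all_neighbors p.1 p.2) libs0 z
    rw [h2]
    simp only [List.mem_cons, beq_iff_eq]
    constructor
    · rintro ((h | ⟨h1, h2⟩) | ⟨r, hr, h1, h2⟩)
      · exact Or.inl h
      · exact Or.inr ⟨p, Or.inl rfl, h1, h2⟩
      · exact Or.inr ⟨r, Or.inr hr, h1, h2⟩
    · rintro (h | ⟨r, (rfl | hr), h1, h2⟩)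
      · exact Or.inl (Or.inl h)
      · exact Or.inl (Or.inr ⟨h1, h2⟩)
      · exact Or.inr ⟨r, hr, h1, h2⟩

lemma liberty_empty_iff {piece_type : Int} {board : List (List Int)} {p : Int × Int}
    (h : InGrid p) :
    liberty board p.1 p.2 piece_type = [] ↔ ¬ Alive piece_type board p := by
  unfold liberty
  rw [List.eq_nil_iff_forall_not_mem]
  constructor
  · intro hno hAlive
    obtain ⟨c, hR, q, hq, hcell⟩ := hAlive
    exact hno q ((mem_liberty_fold board _ [] q).2 (Or.inr ⟨c, (mem_ACFN h).2 hR, hq, hcell⟩))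
  · intro hna z hz
    rcases (mem_liberty_fold board _ [] z).1 hz with h0 | ⟨r, hr, hnb, hcell⟩
    · simp at h0
    · exact hna ⟨r, (mem_ACFN h).1 hr, z, hnb, hcell⟩

lemma find_dead_stones_eq_fold (piece_type : Int) (board : List (List Int)) :
    find_dead_stones piece_type board = rowMajor.foldl
      (fun dead p => if pvCell board p.1 p.2 == some piece_type then
          (if (liberty board p.1 p.2 piece_type).isEmpty && !(dead.contains p) then dead ++ [p] else dead)
        else dead) [] := by
  unfold rowMajor
  rw [List.foldl_flatMap]
  simp only [List.foldl_map]
  rfl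

lemma find_dead_stones_eq_filter (piece_type : Int) (board : List (List Int)) :
    find_dead_stones piece_type board =
      rowMajor.filter (fun p =>
        (pvCell board p.1 p.2 == some piece_type) && (liberty board p.1 p.2 piece_type).isEmpty) := by
  rw [find_dead_stones_eq_fold]
  have hcg := PySem.List.foldl_congr_mem (l := rowMajor)
    (f := fun dead p => if pvCell board p.1 p.2 == some piece_type then
        (if (liberty board p.1 p.2 piece_type).isEmpty && !(dead.contains p) then dead ++ [p] else dead)
      else dead)
    (g := fun s a => if ((pvCell board a.1 a.2 == some piece_type) &&
        (liberty board a.1 a.2 piece_type).isEmpty) && !(s.contains a) then s ++ [a] else s)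
    (init := [])
    (by
      intro acc x _
      by_cases h1 : (pvCell board x.1 x.2 == some piece_type) = true
      · simp [h1]
      · simp [h1])
  rw [hcg]
  have h3 := foldl_dedup_eq_filter (fun a : Int × Int => (pvCell board a.1 a.2 == some piece_type) &&
    (liberty board a.1 a.2 piece_type).isEmpty) rowMajor [] (by simp) nodup_rowMajor
  rw [h3]
  simp

-- ---- B-side: fixed-point sweep characterisation ----

def stonesL (piece_type : Int) (board : List (List Int)) : List (Int × Int) :=
  rowMajor.filter (fun p => pvCell board p.1 p.2 == some piece_type)

def passL (piece_type : Int) (board : List (List Int)) (al : List (Int × Int)) : List (Int × Int) :=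
  (stonesL piece_type board).foldl
    (fun al p => if !(al.contains p) && pvTrigger board al p then al ++ [p] else al) al

def aliveL (piece_type : Int) (board : List (List Int)) : List (Int × Int) :=
  (passL piece_type board)^[26] []

lemma mem_stonesL {piece_type : Int} {board : List (List Int)} {p : Int × Int} :
    p ∈ stonesL piece_type board ↔ InGrid p ∧ Friendly piece_type board p := by
  simp [stonesL, List.mem_filter, mem_rowMajor_iff, Friendly]

lemma stones_fold_eq (piece_type : Int) (board : List (List Int)) :
    (PySem.List.pyRange 0 5 1).foldl (fun acc x =>
      (PySem.List.pyRange 0 5 1).foldl (fun acc y =>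
        if pvCell board x y == some piece_type then acc ++ [(x, y)] else acc) acc) [] =
      stonesL piece_type board := by
  have h1 : (PySem.List.pyRange 0 5 1).foldl (fun acc x =>
      (PySem.List.pyRange 0 5 1).foldl (fun acc y =>
        if pvCell board x y == some piece_type then acc ++ [(x, y)] else acc) acc) [] =
      rowMajor.foldl (fun acc p => if pvCell board p.1 p.2 == some piece_type then acc ++ [p] else acc) [] := by
    unfold rowMajor
    rw [List.foldl_flatMap]
    simp only [List.foldl_map]
    rfl
  rw [h1, PySem.List.foldl_append_if_eq_filter (fun p => pvCell board p.1 p.2 == some piece_type) rowMajor []]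
  simp [stonesL]

lemma find_dead_stones_alt_eq (piece_type : Int) (board : List (List Int)) :
    find_dead_stones_alt piece_type board =
      (stonesL piece_type board).filter (fun p => !((aliveL piece_type board).contains p)) := by
  unfold find_dead_stones_alt
  simp only [stones_fold_eq]
  rw [foldl_const_iterate]
  rfl

lemma pvStep_prefix (board : List (List Int)) (al : List (Int × Int)) (p : Int × Int) :
    al <+: (if !(al.contains p) && pvTrigger board al p then al ++ [p] else al) := by
  split_ifs with h
  · exact List.prefix_append al [p]
  · exact List.prefix_rfl

lemma foldl_guard_prefix (board : List (List Int)) :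
    ∀ (l : List (Int × Int)) (al : List (Int × Int)),
      al <+: l.foldl (fun al p => if !(al.contains p) && pvTrigger board al p then al ++ [p] else al) al := by
  intro l
  induction l with
  | nil => intro al; exact List.prefix_rfl
  | cons p l ih =>
    intro al
    simp only [List.foldl_cons]
    exact (pvStep_prefix board al p).trans (ih _)

lemma foldl_guard_mem (board : List (List Int)) :
    ∀ (l al : List (Int × Int)) (x : Int × Int),
      x ∈ l.foldl (fun al p => if !(al.contains p) && pvTrigger board al p then al ++ [p] else al) al →
      x ∈ al ∨ x ∈ l := by
  intro l
  induction l with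
  | nil => intro al x hx; exact Or.inl hx
  | cons p l ih =>
    intro al x hx
    simp only [List.foldl_cons] at hx
    rcases ih _ x hx with h | h
    · split_ifs at h with hg
      · rcases List.mem_append.1 h with h | h
        · exact Or.inl h
        · simp only [List.mem_singleton] at h; subst h; exact Or.inr (by simp)
      · exact Or.inl h
    · exact Or.inr (by simp [h])

lemma foldl_guard_nodup (board : List (List Int)) :
    ∀ (l al : List (Int × Int)), al.Nodup →
      (l.foldl (fun al p => if !(al.contains p) && pvTrigger board al p then al ++ [p] else al) al).Nodup := by
  intro l
  induction l with
  | nil => intro al h; exact h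
  | cons p l ih =>
    intro al h
    simp only [List.foldl_cons]
    apply ih
    split_ifs with hg
    · rw [Bool.and_eq_true] at hg
      have hna : p ∉ al := by
        have := hg.1
        simpa using this
      exact pvNodupSnoc h hna
    · exact h

lemma foldl_guard_fix (board : List (List Int)) :
    ∀ (l : List (Int × Int)) (al : List (Int × Int)),
      l.foldl (fun al p => if !(al.contains p) && pvTrigger board al p then al ++ [p] else al) al = al →
      ∀ p ∈ l, p ∈ al ∨ pvTrigger board al p = false := by
  intro l
  induction l with
  | nil => intro al _ p hp; simp at hp
  | cons q l ih =>
    intro al hfold p hp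
    simp only [List.foldl_cons] at hfold
    have h1 := pvStep_prefix board al q
    have h2 := foldl_guard_prefix board l
      (if !(al.contains q) && pvTrigger board al q then al ++ [q] else al)
    rw [hfold] at h2
    have heq : (if !(al.contains q) && pvTrigger board al q then al ++ [q] else al) = al :=
      List.IsPrefix.eq_of_length h2 (Nat.le_antisymm h2.length_le h1.length_le)
    rw [heq] at hfold
    rcases List.mem_cons.1 hp with rfl | hpl
    · by_cases hm : p ∈ al
      · exact Or.inl hm
      · right
        by_cases ht : pvTrigger board al p = true
        · exfalso
          rw [if_pos (by simp [hm, ht])] at heq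
          have := congrArg List.length heq
          simp at this
        · simpa using ht
    · exact ih al hfold p hpl

lemma passL_fixed (piece_type : Int) (board : List (List Int)) :
    passL piece_type board (aliveL piece_type board) = aliveL piece_type board := by
  set f := passL piece_type board with hf
  have hpre : ∀ al, al <+: f al := fun al => foldl_guard_prefix board _ al
  have hnd : ∀ n : Nat, (f^[n] ([] : List (Int × Int))).Nodup := by
    intro n
    induction n with
    | zero => simp
    | succ n ihn =>
      rw [Function.iterate_succ_apply']
      exact foldl_guard_nodup board _ _ ihn
  have hsub : ∀ n : Nat, (f^[n] ([] : List (Int × Int))) ⊆ rowMajor := by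
    intro n
    induction n with
    | zero => simp
    | succ n ihn =>
      rw [Function.iterate_succ_apply']
      intro x hx
      rcases foldl_guard_mem board _ _ x hx with h | h
      · exact ihn h
      · exact (List.mem_filter.1 h).1
  have hlen : ∀ n : Nat, (f^[n] ([] : List (Int × Int))).length ≤ 25 := by
    intro n
    have := (List.subperm_of_subset (hnd n) (hsub n)).length_le
    rwa [length_rowMajor] at this
  have hexists : ∃ k < 26, f (f^[k] ([] : List (Int × Int))) = f^[k] [] := by
    by_contra hcon
    push Not at hcon
    have hstrict : ∀ k : Nat, k < 26 →
        (f^[k] ([] : List (Int × Int))).length + 1 ≤ (f^[k+1] []).length := by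
      intro k hk
      have hne := hcon k hk
      have hp := hpre (f^[k] ([] : List (Int × Int)))
      rw [← Function.iterate_succ_apply' f k] at hne hp
      rcases Nat.lt_or_ge (f^[k] ([] : List (Int × Int))).length (f^[k+1] []).length with h | h
      · omega
      · exfalso
        exact hne (List.IsPrefix.eq_of_length hp (Nat.le_antisymm hp.length_le h)).symm
    have hge : ∀ k : Nat, k ≤ 26 → k ≤ (f^[k] ([] : List (Int × Int))).length := by
      intro k
      induction k with
      | zero => intro _; exact Nat.zero_le _
      | succ k ihk =>
        intro hk
        have ha := hstrict k (by omega)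
        have hb := ihk (by omega)
        omega
    have hx := hge 26 le_rfl
    have hy := hlen 26
    omega
  obtain ⟨k, hk, hfix⟩ := hexists
  have h2 : aliveL piece_type board = f^[k] [] := by
    show f^[26] [] = f^[k] []
    rw [show (26 : Nat) = (26 - k) + k by omega, Function.iterate_add_apply]
    exact Function.iterate_fixed hfix (26 - k)
  rw [h2]
  exact hfix

lemma pass_inv (piece_type : Int) (board : List (List Int)) (al : List (Int × Int))
    (h : ∀ x ∈ al, InGrid x ∧ Friendly piece_type board x ∧ Alive piece_type board x) :
    ∀ x ∈ passL piece_type board al, InGrid x ∧ Friendly piece_type board x ∧ Alive piece_type board x := by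
  unfold passL
  suffices haux : ∀ l : List (Int × Int), (∀ p ∈ l, p ∈ stonesL piece_type board) →
      ∀ al : List (Int × Int), (∀ x ∈ al, InGrid x ∧ Friendly piece_type board x ∧ Alive piece_type board x) →
      ∀ x ∈ l.foldl (fun al p => if !(al.contains p) && pvTrigger board al p then al ++ [p] else al) al,
        InGrid x ∧ Friendly piece_type board x ∧ Alive piece_type board x by
    exact haux _ (fun p hp => hp) al h
  intro l
  induction l with
  | nil => intro _ al hal x hx; exact hal x hx
  | cons p l ih =>
    intro hsub al hal
    simp only [List.foldl_cons]
    apply ih (fun q hq => hsub q (by simp [hq]))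
    intro x hx
    by_cases hg : (!(al.contains p) && pvTrigger board al p) = true
    · rw [if_pos hg] at hx
      rcases List.mem_append.1 hx with hx | hx
      · exact hal x hx
      · simp only [List.mem_singleton] at hx
        subst hx
        have hps : x ∈ stonesL piece_type board := hsub x (by simp)
        obtain ⟨hpg, hpf⟩ := mem_stonesL.1 hps
        refine ⟨hpg, hpf, ?_⟩
        have ht : pvTrigger board al x = true := by
          rw [Bool.and_eq_true] at hg; exact hg.2
        unfold pvTrigger at ht
        rw [List.any_eq_true] at ht
        obtain ⟨q, hq4, hcond⟩ := ht
        simp only [Bool.and_eq_true, decide_eq_true_eq, Bool.or_eq_true] at hcond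
        obtain ⟨⟨⟨⟨hq1, hq2⟩, hq3⟩, hq4'⟩, hor⟩ := hcond
        have hqg : InGrid q := ⟨hq1, hq2, hq3, hq4'⟩
        have hqnb : q ∈ all_neighbors x.1 x.2 := (mem_all_neighbors_iff_nbrs4 hpg).2 ⟨hq4, hqg⟩
        rcases hor with hcell | hmem
        · exact ⟨x, Relation.ReflTransGen.refl, q, hqnb, by simpa [EmptyAt] using hcell⟩
        · obtain ⟨_, hqf, hqa⟩ := hal q (by simpa using hmem)
          obtain ⟨c, hR, hL⟩ := hqa
          exact ⟨c, Relation.ReflTransGen.head ⟨hqnb, hqf⟩ hR, hL⟩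
    · rw [if_neg hg] at hx
      exact hal x hx

lemma aliveL_inv (piece_type : Int) (board : List (List Int)) :
    ∀ x ∈ aliveL piece_type board,
      InGrid x ∧ Friendly piece_type board x ∧ Alive piece_type board x := by
  have haux : ∀ n : Nat, ∀ x ∈ (passL piece_type board)^[n] ([] : List (Int × Int)),
      InGrid x ∧ Friendly piece_type board x ∧ Alive piece_type board x := by
    intro n
    induction n with
    | zero => intro x hx; simp at hx
    | succ n ihn =>
      rw [Function.iterate_succ_apply']
      exact pass_inv piece_type board _ ihn
  exact haux 26

lemma alive_complete (piece_type : Int) (board : List (List Int)) :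
    ∀ p, InGrid p → Friendly piece_type board p → Alive piece_type board p →
      p ∈ aliveL piece_type board := by
  have hclosed : ∀ p ∈ stonesL piece_type board,
      p ∈ aliveL piece_type board ∨ pvTrigger board (aliveL piece_type board) p = false := by
    have hfix := passL_fixed piece_type board
    unfold passL at hfix
    exact foldl_guard_fix board _ _ hfix
  have htrig : ∀ a : Int × Int, InGrid a →
      (∃ q ∈ all_neighbors a.1 a.2, EmptyAt board q ∨ q ∈ aliveL piece_type board) →
      pvTrigger board (aliveL piece_type board) a = true := by
    rintro a hga ⟨q, hqnb, hor⟩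
    unfold pvTrigger
    rw [List.any_eq_true]
    obtain ⟨hq4, hqg⟩ := (mem_all_neighbors_iff_nbrs4 hga).1 hqnb
    refine ⟨q, hq4, ?_⟩
    obtain ⟨a1, a2, a3, a4⟩ := hqg
    simp only [Bool.and_eq_true, decide_eq_true_eq, Bool.or_eq_true]
    refine ⟨⟨⟨⟨a1, a2⟩, a3⟩, a4⟩, ?_⟩
    rcases hor with h | h
    · exact Or.inl (by simpa [EmptyAt] using h)
    · exact Or.inr (by simpa using h)
  intro p hg hf hA
  obtain ⟨c, hR, hL⟩ := hA
  revert hg hf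
  induction hR using Relation.ReflTransGen.head_induction_on with
  | refl =>
    intro hg hf
    rcases hclosed c (mem_stonesL.2 ⟨hg, hf⟩) with h | h
    · exact h
    · exfalso
      obtain ⟨q, hqnb, hqe⟩ := hL
      rw [htrig c hg ⟨q, hqnb, Or.inl hqe⟩] at h
      simp at h
  | head hstep htail ih =>
    intro hg hf
    obtain ⟨hnb, hfb⟩ := hstep
    have hgb : InGrid _ := inGrid_of_mem_all_neighbors hg hnb
    have hb := ih hgb hfb
    rcases hclosed _ (mem_stonesL.2 ⟨hg, hf⟩) with h | h
    · exact h
    · exfalso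
      rw [htrig _ hg ⟨_, hnb, Or.inr hb⟩] at h
      simp at h

-- ===== VERDICT (by name: the statement is the Claim_ definition above) =====
theorem find_dead_stones_spec : Claim_equal_find_dead_stones := by
  intro piece_type board _ _
  unfold Spec_find_dead_stones
  rw [find_dead_stones_eq_filter, find_dead_stones_alt_eq]
  unfold stonesL
  rw [List.filter_filter]
  apply List.filter_congr
  intro p hp
  by_cases hc : (pvCell board p.1 p.2 == some piece_type) = true
  · have hg : InGrid p := mem_rowMajor_iff.1 hp
    have hf : Friendly piece_type board p := by simpa [Friendly] using hc
    have hiff : liberty board p.1 p.2 piece_type = [] ↔ ¬ Alive piece_type board p :=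
      liberty_empty_iff hg
    have hmem : p ∈ aliveL piece_type board ↔ Alive piece_type board p :=
      ⟨fun h => (aliveL_inv _ _ p h).2.2, fun h => alive_complete _ _ p hg hf h⟩
    rw [hc]
    simp only [Bool.and_true, Bool.true_and]
    by_cases hA : Alive piece_type board p
    · have h1 : ¬ (liberty board p.1 p.2 piece_type = []) := fun he => (hiff.1 he) hA
      have h2 : p ∈ aliveL piece_type board := hmem.2 hA
      simp [h1, h2]
    · have h1 : liberty board p.1 p.2 piece_type = [] := hiff.2 hA
      have h2 : p ∉ aliveL piece_type board := fun h => hA (hmem.1 h)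
      simp [h1, h2]
  · have hc' : (pvCell board p.1 p.2 == some piece_type) = false := by simpa using hc
    simp [hc']
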